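-- pv_equiv track=rewrite | github.com/lililuya/sam4dbodyForAnimate | scripts/wan_face_export.py | fill_face_gaps
-- ===== SOURCE A (Python) =====
-- def fill_face_gaps(sequence, max_gap: int):
--     filled = list(sequence)
--     gap_start = None
--     for index in range(len(filled)):
--         current = filled[index]
--         if current is None:
--             if gap_start is None:
--                 gap_start = index
--             continue
--         if gap_start is None:
--             continue
--
--         previous = filled[gap_start - 1] if gap_start > 0 else None
--         gap_length = index - gap_start
--         if previous is not None and gap_length <= int(max_gap):
--             for fill_index in range(gap_start, index):
--                 filled[fill_index] = previous
--         gap_start = None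
--
--     if gap_start is not None:
--         previous = filled[gap_start - 1] if gap_start > 0 else None
--         gap_length = len(filled) - gap_start
--         if previous is not None and gap_length <= int(max_gap):
--             for fill_index in range(gap_start, len(filled)):
--                 filled[fill_index] = previous
--     return filled
-- ===== SOURCE B (Python) =====
-- def fill_face_gaps(sequence, max_gap: int):
--     g = int(max_gap)
--     n = len(sequence)
--     # pass 1: left[i] = index of nearest non-None at or before i (None if absent)
--     left = []
--     last = None
--     for i in range(n):
--         if sequence[i] is not None:
--             last = i
--         left.append(last)
--     # pass 2: right[i] = index of nearest non-None at or after i (None if absent)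
--     right = []
--     nxt = None
--     for i in reversed(range(n)):
--         if sequence[i] is not None:
--             nxt = i
--         right.append(nxt)
--     right.reverse()
--     # pass 3: pointwise decision — a None at i is filled from its left neighbour
--     # iff the gap (from left[i]+1 to right[i], or n) has length <= g
--     out = []
--     for i in range(n):
--         x = sequence[i]
--         if x is None and left[i] is not None:
--             l = left[i]
--             end = right[i] if right[i] is not None else n
--             if end - l - 1 <= g:
--                 out.append(sequence[l])
--                 continue
--         out.append(x)
--     return out
-- ===== Notes on version B (the rewrite author's own statement) =====
-- stated objective: alternative
-- what changed: B abandons run/gap bookkeeping entirely: it precomputes two index arrays (nearest non-None index at-or-before i, and at-or-after i) in two scans, then decides each output element independently by a pointwise formula on those arrays (fill a None iff right[i]-left[i]-1 <= max_gap), instead of A's single stateful pass that tracks a gap start and rewrites slices in place.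
import Mathlib
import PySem

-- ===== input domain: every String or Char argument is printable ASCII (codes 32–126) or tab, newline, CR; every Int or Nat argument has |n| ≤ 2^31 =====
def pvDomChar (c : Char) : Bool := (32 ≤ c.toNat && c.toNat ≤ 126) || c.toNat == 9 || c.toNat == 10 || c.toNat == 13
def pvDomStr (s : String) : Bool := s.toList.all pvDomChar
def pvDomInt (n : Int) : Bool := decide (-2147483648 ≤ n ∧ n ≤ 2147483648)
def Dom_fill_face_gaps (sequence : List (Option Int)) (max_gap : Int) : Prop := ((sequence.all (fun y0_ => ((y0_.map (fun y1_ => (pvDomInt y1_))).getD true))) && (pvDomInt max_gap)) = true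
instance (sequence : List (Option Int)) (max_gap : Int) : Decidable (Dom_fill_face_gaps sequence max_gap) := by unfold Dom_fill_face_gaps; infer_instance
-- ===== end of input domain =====

-- B replaces A's stateful gap-start scan by two precomputed nearest-non-None index arrays
-- plus a pointwise fill decision per element; same O(n) cost, no speed claim.

-- ===== PORT A =====
-- one loop-body step of A's main `for index in range(len(filled))` loop;
-- state = (filled, gap_start). The inner `for fill_index in range(gap_start, index)`
-- write loop is the foldl over List.range' gap_start (index - gap_start) (range(a,b) with a ≤ b).
def pvAStep (g : Int) (st : List (Option Int) × Option Nat) (index : Nat) :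
    List (Option Int) × Option Nat :=
  let filled := st.1
  let current := filled.getD index none
  match current with
  | none =>
    match st.2 with
    | none => (filled, some index)
    | some _ => st
  | some _ =>
    match st.2 with
    | none => st
    | some gs =>
      let previous := if gs > 0 then filled.getD (gs - 1) none else none
      let gapLength : Nat := index - gs
      let filled' :=
        if previous ≠ none ∧ (gapLength : Int) ≤ g then
          (List.range' gs (index - gs)).foldl (fun f j => f.set j previous) filled
        else filled
      (filled', none)

-- the post-loop `if gap_start is not None:` block of A
def pvAFinish (g : Int) (st : List (Option Int) × Option Nat) : List (Option Int) :=
  match st.2 with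
  | none => st.1
  | some gs =>
    let filled := st.1
    let previous := if gs > 0 then filled.getD (gs - 1) none else none
    let gapLength : Nat := filled.length - gs
    if previous ≠ none ∧ (gapLength : Int) ≤ g then
      (List.range' gs (filled.length - gs)).foldl (fun f j => f.set j previous) filled
    else filled

def fill_face_gaps (sequence : List (Option Int)) (max_gap : Int) : List (Option Int) :=
  pvAFinish max_gap ((List.range sequence.length).foldl (pvAStep max_gap) (sequence, none))

-- ===== PORT B =====
-- pass 1 of Source B: left[i] = nearest non-None index at or before i (fold state = (last, left))
def pvLeftPass (seq : List (Option Int)) : List (Option Nat) :=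
  ((List.range seq.length).foldl
    (fun st i =>
      let last := if seq.getD i none ≠ none then some i else st.1
      (last, st.2 ++ [last]))
    (none, [])).2

-- pass 2 of Source B: right[i] = nearest non-None index at or after i; the loop runs over
-- reversed(range(n)) appending nxt, then the list is reversed (exactly Source B's code)
def pvRightPass (seq : List (Option Int)) : List (Option Nat) :=
  (((List.range seq.length).reverse).foldl
    (fun st i =>
      let nxt := if seq.getD i none ≠ none then some i else st.1
      (nxt, st.2 ++ [nxt]))
    (none, [])).2.reverse

-- pass 3 of Source B: pointwise decision per index
def fill_face_gaps_alt (sequence : List (Option Int)) (max_gap : Int) : List (Option Int) :=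
  let n := sequence.length
  let left := pvLeftPass sequence
  let right := pvRightPass sequence
  (List.range n).foldl
    (fun out i =>
      let x := sequence.getD i none
      if x = none then
        match left.getD i none with
        | some l =>
          let e : Nat := (right.getD i none).getD n
          if (e : Int) - (l : Int) - 1 ≤ max_gap then out ++ [sequence.getD l none]
          else out ++ [x]
        | none => out ++ [x]
      else out ++ [x]) []

-- ===== PRECONDITION & SPEC =====
def Spec_fill_face_gaps (sequence : List (Option Int)) (max_gap : Int) (out : List (Option Int)) : Prop := out = fill_face_gaps_alt sequence max_gap
instance (sequence : List (Option Int)) (max_gap : Int) (out : List (Option Int)) : Decidable (Spec_fill_face_gaps sequence max_gap out) := by unfold Spec_fill_face_gaps; infer_instance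

-- ===== CLAIM (what is proved, stated in full; the proofs are below) =====
def Claim_equal_fill_face_gaps : Prop := ∀ (sequence : List (Option Int)) (max_gap : Int), Dom_fill_face_gaps sequence max_gap → Spec_fill_face_gaps sequence max_gap (fill_face_gaps sequence max_gap)

-- ===== LEMMAS AND PROOFS =====

-- proof-side run-fold intermediate R (one pass buffering the pending None-run);
-- A is proved equal to R (pv_main), R equal to the pointwise map (pv_sim), and B equal
-- to the pointwise map (pv_alt_char).
def pvRStep (g : Int) (st : List (Option Int) × Option Int × List (Option Int))
    (x : Option Int) : List (Option Int) × Option Int × List (Option Int) :=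
  match x with
  | none => (st.1, st.2.1, st.2.2 ++ [none])
  | some v =>
    let out1 :=
      if st.2.2.isEmpty then st.1
      else st.1 ++ (if st.2.1 ≠ none ∧ (st.2.2.length : Int) ≤ g then
                      List.replicate st.2.2.length st.2.1
                    else st.2.2)
    (out1 ++ [some v], some v, ([] : List (Option Int)))

def pvRFinish (g : Int) (st : List (Option Int) × Option Int × List (Option Int)) :
    List (Option Int) :=
  if st.2.2.isEmpty then st.1
  else st.1 ++ (if st.2.1 ≠ none ∧ (st.2.2.length : Int) ≤ g then
                  List.replicate st.2.2.length st.2.1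
                else st.2.2)

-- nearest non-None index at or before i / at or after i, as recursive functions
def pvLast (seq : List (Option Int)) : Nat → Option Nat
  | 0 => if seq.getD 0 none ≠ none then some 0 else none
  | i+1 => if seq.getD (i+1) none ≠ none then some (i+1) else pvLast seq i

-- the value of the `last` state entering index k (none for k = 0)
def pvLastS (seq : List (Option Int)) : Nat → Option Nat
  | 0 => none
  | i+1 => pvLast seq i

def pvNext (seq : List (Option Int)) (i : Nat) : Option Nat :=
  if i < seq.length then
    if seq.getD i none ≠ none then some i else pvNext seq (i+1)
  else none
termination_by seq.length - i
decreasing_by omega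

-- the pointwise fill decision
def pvDecide (seq : List (Option Int)) (g : Int) (i : Nat) : Option Int :=
  if seq.getD i none = none then
    match pvLast seq i with
    | some l =>
      if (((pvNext seq i).getD seq.length : Nat) : Int) - (l : Int) - 1 ≤ g then
        seq.getD l none
      else none
    | none => none
  else seq.getD i none

-- invariant on the processed prefix: empty, or ending in its last non-None value
def pvInv (out : List (Option Int)) (prev : Option Int) : Prop :=
  (out = [] ∧ prev = none) ∨ (∃ o' p, prev = some p ∧ out = o' ++ [some p])

-- reading the element just past a prefix
theorem pv_getD_mid (pre : List (Option Int)) (x : Option Int) (rest : List (Option Int)) :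
    (pre ++ x :: rest).getD pre.length none = x := by
  induction pre with
  | nil => rfl
  | cons a pre ih => simpa using ih

-- the inner write loop of A overwrites exactly the run region
theorem pv_setFold (v : Option Int) :
    ∀ (run out tail : List (Option Int)),
      (List.range' out.length run.length).foldl (fun f j => f.set j v) (out ++ run ++ tail)
        = out ++ List.replicate run.length v ++ tail := by
  intro run
  induction run with
  | nil => intro out tail; simp
  | cons r run ih =>
    intro out tail
    have hset : (out ++ r :: (run ++ tail)).set out.length v
        = out ++ v :: (run ++ tail) := by
      rw [List.set_append_right _ _ (le_refl _)]
      simp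
    calc (List.range' out.length (r :: run).length).foldl (fun f j => f.set j v)
            (out ++ (r :: run) ++ tail)
        = (List.range' (out.length + 1) run.length).foldl (fun f j => f.set j v)
            ((out ++ [v]) ++ run ++ tail) := by
          simp only [List.range'_succ, List.foldl_cons, List.length_cons]
          congr 1
          simpa using hset
      _ = (out ++ [v]) ++ List.replicate run.length v ++ tail := by
          have := ih (out ++ [v]) tail
          simpa using this
      _ = out ++ List.replicate (r :: run).length v ++ tail := by
          simp [List.replicate_succ]

-- A = R: from any aligned pair of loop states, A's remaining loop + trailing block
-- computes the same list as R's remaining loop + final flush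
theorem pv_main (g : Int) :
    ∀ (rest out run : List (Option Int)) (prev : Option Int),
      run = List.replicate run.length none →
      pvInv out prev →
      pvAFinish g ((List.range' (out.length + run.length) rest.length).foldl (pvAStep g)
          (out ++ run ++ rest, if run.isEmpty then none else some out.length))
        = pvRFinish g (rest.foldl (pvRStep g) (out, prev, run)) := by
  intro rest
  induction rest with
  | nil =>
    intro out run prev hrun hinv
    by_cases hre : run = []
    · subst hre; simp [pvAFinish, pvRFinish]
    · have hne : run.isEmpty = false := by simpa [List.isEmpty_iff] using hre
      simp only [List.length_nil, List.range', List.foldl_nil, hne, List.append_nil]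
      rcases hinv with ⟨ho, hp⟩ | ⟨o', p, hp, ho⟩
      · subst ho; subst hp
        simp [pvAFinish, pvRFinish, hne]
      · subst hp; subst ho
        have hprev : ((o' ++ [some p]) ++ run).getD ((o' ++ [some p]).length - 1) none
            = some p := by
          have : (o' ++ some p :: run).getD o'.length none = some p := pv_getD_mid o' _ run
          simpa using this
        have hlen : ((o' ++ [some p]) ++ run).length - (o' ++ [some p]).length
            = run.length := by simp; omega
        by_cases hc : (run.length : Int) ≤ g
        · have hfold := pv_setFold (some p) run (o' ++ [some p]) []
          have harith : o'.length + (run.length + 1) - (o'.length + 1) = run.length := by omega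
          simp [pvAFinish, pvRFinish, hne, hprev, hlen, hc, harith]
          simpa using hfold
        · simp [pvAFinish, pvRFinish, hne, hprev, hlen, hc]
  | cons x rest ih =>
    intro out run prev hrun hinv
    have hcur : (out ++ run ++ x :: rest).getD (out.length + run.length) none = x := by
      have := pv_getD_mid (out ++ run) x rest
      simpa using this
    match x with
    | none =>
      have hA : pvAStep g (out ++ run ++ none :: rest, if run.isEmpty then none else some out.length)
          (out.length + run.length)
          = (out ++ (run ++ [none]) ++ rest,
             if (run ++ [none]).isEmpty then none else some out.length) := by
        by_cases hre : run = []
        · subst hre; simp [pvAStep, hcur]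
        · have hne : run.isEmpty = false := by simpa [List.isEmpty_iff] using hre
          simp [pvAStep, hcur, hne]
      have hrun' : run ++ [none] = List.replicate (run ++ [none]).length none := by
        conv_lhs => rw [hrun]
        simp [List.replicate_succ']
      have := ih out (run ++ [none]) prev hrun' hinv
      simp only [List.length_cons, List.range'_succ, List.foldl_cons, hA]
      simpa [Nat.add_assoc] using this
    | some v =>
      by_cases hre : run = []
      · subst hre
        have hA : pvAStep g (out ++ some v :: rest, none) out.length
            = (out ++ some v :: rest, none) := by
          simp [pvAStep, pv_getD_mid out (some v) rest]
        have := ih (out ++ [some v]) [] (some v) rfl (Or.inr ⟨out, v, rfl, rfl⟩)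
        simp only [List.length_cons, List.range'_succ, List.foldl_cons, List.length_nil,
          Nat.add_zero, List.nil_append, List.append_nil]
        rw [show (if ([] : List (Option Int)).isEmpty = true then (none : Option Nat) else some out.length) = none from rfl]
        rw [hA]
        simp only [List.foldl_cons, pvRStep, List.isEmpty_nil]
        simpa [Nat.add_assoc] using this
      · have hne : run.isEmpty = false := by simpa [List.isEmpty_iff] using hre
        rcases hinv with ⟨ho, hp⟩ | ⟨o', p, hp, ho⟩
        · subst ho; subst hp
          have hcur' : (([] : List (Option Int)) ++ run ++ some v :: rest).getD run.length none
              = some v := by simpa using hcur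
          have hA : pvAStep g (([] : List (Option Int)) ++ run ++ some v :: rest,
              if run.isEmpty = true then (none : Option Nat) else some 0) run.length
              = (([] : List (Option Int)) ++ run ++ some v :: rest, none) := by
            simp [pvAStep, hcur', hne]
          have hinv' : pvInv ((run ++ [some v])) (some v) := Or.inr ⟨run, v, rfl, rfl⟩
          have := ih (run ++ [some v]) [] (some v) rfl hinv'
          simp only [List.length_nil, List.length_cons, Nat.zero_add, List.range'_succ,
            List.foldl_cons]
          rw [hA]
          simp only [List.foldl_cons, pvRStep, hne]
          simpa [Nat.add_comm, Nat.add_assoc] using this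
        · subst hp; subst ho
          have hprev : ((o' ++ [some p]) ++ run ++ some v :: rest).getD
              ((o' ++ [some p]).length - 1) none = some p := by
            have : (o' ++ some p :: (run ++ some v :: rest)).getD o'.length none = some p :=
              pv_getD_mid o' _ _
            simpa using this
          have hgl : (o' ++ [some p]).length + run.length - (o' ++ [some p]).length
              = run.length := by omega
          by_cases hc : (run.length : Int) ≤ g
          · have hfold := pv_setFold (some p) run (o' ++ [some p]) (some v :: rest)
            have hA : pvAStep g ((o' ++ [some p]) ++ run ++ some v :: rest, some (o' ++ [some p]).length)
                ((o' ++ [some p]).length + run.length)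
                = ((o' ++ [some p]) ++ List.replicate run.length (some p) ++ some v :: rest, none) := by
              simp only [pvAStep]
              rw [hcur]
              simp only [hgl]
              simp [hprev, hc]
              simpa using hfold
            have hinv' : pvInv ((o' ++ [some p]) ++ List.replicate run.length (some p) ++ [some v])
                (some v) := Or.inr ⟨(o' ++ [some p]) ++ List.replicate run.length (some p), v, rfl, rfl⟩
            have := ih ((o' ++ [some p]) ++ List.replicate run.length (some p) ++ [some v]) []
              (some v) rfl hinv'
            simp only [List.length_cons, List.range'_succ, List.foldl_cons]
            rw [show (if run.isEmpty then (none : Option Nat) else some (o' ++ [some p]).length) = some (o' ++ [some p]).length by simp [hne]]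
            rw [hA]
            simp only [List.foldl_cons, pvRStep, hne]
            simp only [Option.some_ne_none, hc]
            simp only [List.length_nil, List.append_nil, List.isEmpty_nil] at this ⊢
            rw [show (o' ++ [some p]).length + run.length + 1
                  = ((o' ++ [some p]) ++ List.replicate run.length (some p) ++ [some v]).length + 0 by
                simp; omega]
            have heq : ((o' ++ [some p]) ++ List.replicate run.length (some p) ++ some v :: rest)
                = ((o' ++ [some p]) ++ List.replicate run.length (some p) ++ [some v]) ++ [] ++ rest := by
              simp
            rw [heq]
            convert this using 4
            simp
          · have hA : pvAStep g ((o' ++ [some p]) ++ run ++ some v :: rest, some (o' ++ [some p]).length)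
                ((o' ++ [some p]).length + run.length)
                = ((o' ++ [some p]) ++ run ++ some v :: rest, none) := by
              simp only [pvAStep]
              rw [hcur]
              simp only [hgl]
              simp [hprev, hc]
            have hinv' : pvInv ((o' ++ [some p]) ++ run ++ [some v]) (some v) :=
              Or.inr ⟨(o' ++ [some p]) ++ run, v, rfl, rfl⟩
            have := ih ((o' ++ [some p]) ++ run ++ [some v]) [] (some v) rfl hinv'
            simp only [List.length_cons, List.range'_succ, List.foldl_cons]
            rw [show (if run.isEmpty then (none : Option Nat) else some (o' ++ [some p]).length) = some (o' ++ [some p]).length by simp [hne]]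
            rw [hA]
            simp only [List.foldl_cons, pvRStep, hne]
            simp only [Option.some_ne_none, hc]
            simp only [List.length_nil, List.append_nil, List.isEmpty_nil] at this ⊢
            rw [show (o' ++ [some p]).length + run.length + 1
                  = ((o' ++ [some p]) ++ run ++ [some v]).length + 0 by simp; omega]
            have heq : ((o' ++ [some p]) ++ run ++ some v :: rest)
                = ((o' ++ [some p]) ++ run ++ [some v]) ++ [] ++ rest := by simp
            rw [heq]
            convert this using 4
            simp

-- pvNext beyond the list
theorem pv_next_ge (seq : List (Option Int)) (i : Nat) (h : seq.length ≤ i) :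
    pvNext seq i = none := by
  rw [pvNext]; simp [Nat.not_lt.mpr h]

-- range split
theorem pv_range_split (a k : Nat) : List.range (a + k) = List.range a ++ List.range' a k := by
  rw [List.range_eq_range', List.range_eq_range', ← List.range'_append]
  simp

-- getD inside a none-run
theorem pv_getD_run (pre : List (Option Int)) (k : Nat) (tail : List (Option Int))
    (t : Nat) (ht : t < k) :
    (pre ++ List.replicate k none ++ tail).getD (pre.length + t) none = none := by
  obtain ⟨m, hm⟩ : ∃ m, k = t + 1 + m := ⟨k - t - 1, by omega⟩
  subst hm
  have hrep : List.replicate (t + 1 + m) (none : Option Int)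
      = List.replicate t none ++ none :: List.replicate (t + 1 + m - t - 1) none := by
    rw [show t + 1 + m - t - 1 = m from by omega, List.replicate_add, List.replicate_succ']
    simp
  rw [hrep]
  have := pv_getD_mid (pre ++ List.replicate t none) none
    (List.replicate (t + 1 + m - t - 1) none ++ tail)
  simp only [List.length_append, List.length_replicate] at this
  simpa using this

theorem pv_last_some (s : List (Option Int)) (i : Nat) (h : s.getD i none ≠ none) :
    pvLast s i = some i := by
  cases i with
  | zero => show (if s.getD 0 none ≠ none then some 0 else none) = some 0; rw [if_pos h]
  | succ n =>
    show (if s.getD (n+1) none ≠ none then some (n+1) else pvLast s n) = some (n+1)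
    rw [if_pos h]

theorem pv_last_run (s : List (Option Int)) (a : Nat) : ∀ (t : Nat),
    (∀ u, u ≤ t → s.getD (a + u) none = none) → pvLast s (a + t) = pvLastS s a := by
  intro t
  induction t with
  | zero =>
    intro h
    have h0 := h 0 (le_refl 0)
    cases a with
    | zero =>
      show (if s.getD 0 none ≠ none then some 0 else none) = none
      rw [if_neg (not_not_intro (by simpa using h0))]
    | succ b =>
      show (if s.getD (b+1+0) none ≠ none then some (b+1+0) else pvLast s (b+0)) = pvLast s b
      rw [if_neg (not_not_intro h0)]
      rfl
  | succ t ih =>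
    intro h
    have hlastnone : s.getD (a + (t+1)) none = none := h (t+1) (le_refl _)
    have : pvLast s (a + (t+1)) = pvLast s (a + t) := by
      show (if s.getD (a+t+1) none ≠ none then some (a+t+1) else pvLast s (a+t)) = pvLast s (a+t)
      rw [if_neg (not_not_intro (by rw [show a+t+1 = a+(t+1) from by omega]; exact hlastnone))]
    rw [this, ih (fun u hu => h u (Nat.le_succ_of_le hu))]

theorem pv_next_skip (s : List (Option Int)) : ∀ (k a : Nat),
    (∀ u, u < k → s.getD (a + u) none = none) → pvNext s a = pvNext s (a + k) := by
  intro k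
  induction k with
  | zero => intro a _; rfl
  | succ k ih =>
    intro a h
    by_cases ha : a < s.length
    · have h0 : s.getD a none = none := by simpa using h 0 (Nat.succ_pos k)
      rw [pvNext, if_pos ha, if_neg (not_not_intro h0)]
      rw [ih (a+1) (fun u hu => by simpa [Nat.add_assoc, Nat.add_comm 1 u] using h (u+1) (by omega))]
      congr 1; omega
    · rw [pv_next_ge s a (by omega), pv_next_ge s (a + (k+1)) (by omega)]

theorem pv_next_some (s : List (Option Int)) (i : Nat) (hi : i < s.length)
    (h : s.getD i none ≠ none) : pvNext s i = some i := by
  rw [pvNext, if_pos hi, if_pos h]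

theorem pv_decide_some (s : List (Option Int)) (g : Int) (i : Nat) (v : Int)
    (h : s.getD i none = some v) : pvDecide s g i = some v := by
  unfold pvDecide
  rw [h]
  simp

theorem pv_map_const {α : Type} (f : Nat → α) (c : α) : ∀ (k a : Nat),
    (∀ t, t < k → f (a + t) = c) → (List.range' a k).map f = List.replicate k c := by
  intro k
  induction k with
  | zero => intro a _; rfl
  | succ k ih =>
    intro a h
    rw [List.range'_succ, List.map_cons,
      show f a = c from by simpa using h 0 (Nat.succ_pos k),
      ih (a+1) (fun t ht => by simpa [Nat.add_assoc, Nat.add_comm 1 t] using h (t+1) (by omega)),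
      List.replicate_succ]

-- the pointwise decision inside a maximal internal/trailing run
theorem pv_decide_in_run (g : Int) (pre run tail : List (Option Int)) (prev : Option Int)
    (hrun : run = List.replicate run.length none)
    (hinv : pvInv pre prev)
    (htail : tail = [] ∨ ∃ v rest', tail = some v :: rest' ∧ True)
    (t : Nat) (ht : t < run.length) :
    pvDecide (pre ++ run ++ tail) g (pre.length + t)
      = if prev ≠ none ∧ (run.length : Int) ≤ g then prev else none := by
  set s := pre ++ run ++ tail with hs
  have hnone : ∀ u, u < run.length → s.getD (pre.length + u) none = none := by
    intro u hu
    rw [hs]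
    conv_lhs => rw [hrun]
    exact pv_getD_run pre run.length tail u hu
  have hget : s.getD (pre.length + t) none = none := hnone t ht
  have hlast : pvLast s (pre.length + t) = pvLastS s pre.length :=
    pv_last_run s pre.length t (fun u hu => hnone u (lt_of_le_of_lt hu ht))
  have hnext : pvNext s (pre.length + t) = pvNext s (pre.length + run.length) := by
    have := pv_next_skip s (run.length - t) (pre.length + t)
      (fun u hu => by
        have := hnone (t + u) (by omega)
        simpa [Nat.add_assoc] using this)
    rw [this]; congr 1; omega
  have hend : (pvNext s (pre.length + run.length)).getD s.length = pre.length + run.length := by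
    rcases htail with h0 | ⟨v, rest', hv, -⟩
    · have hlen : s.length = pre.length + run.length := by simp [hs, h0]
      rw [pv_next_ge s _ (le_of_eq hlen)]
      simp [hlen]
    · have hv' : s.getD (pre.length + run.length) none = some v := by
        have := pv_getD_mid (pre ++ run) (some v) rest'
        simpa [hs, hv] using this
      rw [pv_next_some s _ (by simp [hs, hv]) (by rw [hv']; simp)]
      simp
  rcases hinv with ⟨hpre, hprev⟩ | ⟨o', p, hprev, hpre⟩
  · -- leading run: no previous value
    have : pvLastS s pre.length = none := by rw [hpre]; rfl
    rw [pvDecide, if_pos hget, hlast, this, hprev]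
    simp
  · -- previous value p at index o'.length
    have hp : s.getD o'.length none = some p := by
      have := pv_getD_mid o' (some p) (run ++ tail)
      simpa [hs, hpre] using this
    have hl : pvLastS s pre.length = some o'.length := by
      rw [hpre]
      simp only [List.length_append, List.length_cons, List.length_nil]
      show pvLast s o'.length = some o'.length
      exact pv_last_some s o'.length (by intro hc; rw [hp] at hc; cases hc)
    have harith : ((pre.length + run.length : Nat) : Int) - (o'.length : Int) - 1
        = (run.length : Int) := by
      have : pre.length = o'.length + 1 := by simp [hpre]
      push_cast [this]; ring
    rw [pvDecide, if_pos hget, hlast, hl]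
    show (if (((pvNext s (pre.length + t)).getD s.length : Nat) : Int) - (o'.length : Int) - 1 ≤ g
        then s.getD o'.length none else none) = _
    rw [hnext, hend, harith, hp, hprev]
    by_cases h1 : (run.length : Int) ≤ g
    · rw [if_pos h1, if_pos ⟨by simp, h1⟩]
    · rw [if_neg h1, if_neg (fun hc => h1 hc.2)]

-- R = pointwise map
theorem pv_sim (g : Int) :
    ∀ (rest pre run : List (Option Int)) (prev : Option Int),
      run = List.replicate run.length none →
      pvInv pre prev →
      pvRFinish g (rest.foldl (pvRStep g)
          ((List.range pre.length).map (pvDecide (pre ++ run ++ rest) g), prev, run))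
        = (List.range (pre ++ run ++ rest).length).map (pvDecide (pre ++ run ++ rest) g) := by
  intro rest
  induction rest with
  | nil =>
    intro pre run prev hrun hinv
    by_cases hre : run = []
    · subst hre
      simp [pvRFinish]
    · have hne : run.isEmpty = false := by simpa [List.isEmpty_iff] using hre
      have hflush : pvRFinish g ((List.range pre.length).map (pvDecide (pre ++ run ++ []) g), prev, run)
          = (List.range pre.length).map (pvDecide (pre ++ run ++ []) g)
            ++ (if prev ≠ none ∧ (run.length : Int) ≤ g then List.replicate run.length prev
                else run) := by
        simp [pvRFinish, hne]
      rw [List.foldl_nil, hflush]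
      have hlen : (pre ++ run ++ []).length = pre.length + run.length := by simp
      rw [hlen, pv_range_split, List.map_append]
      congr 1
      rw [pv_map_const (pvDecide (pre ++ run ++ []) g)
            (if prev ≠ none ∧ (run.length : Int) ≤ g then prev else none) run.length pre.length
            (fun t ht => pv_decide_in_run g pre run [] prev hrun hinv (Or.inl rfl) t ht)]
      split_ifs with hc
      · rfl
      · exact hrun
  | cons x rest ih =>
    intro pre run prev hrun hinv
    rw [List.foldl_cons]
    cases x with
    | none =>
      have hstep : pvRStep g ((List.range pre.length).map (pvDecide (pre ++ run ++ none :: rest) g), prev, run) none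
          = ((List.range pre.length).map (pvDecide (pre ++ run ++ none :: rest) g), prev, run ++ [none]) := rfl
      rw [hstep]
      have hseq : pre ++ run ++ none :: rest = pre ++ (run ++ [none]) ++ rest := by simp
      rw [hseq]
      have hrun' : run ++ [none] = List.replicate (run ++ [none]).length none := by
        conv_lhs => rw [hrun]
        simp [List.replicate_succ']
      exact ih pre (run ++ [none]) prev hrun' hinv
    | some v =>
      by_cases hre : run = []
      · subst hre
        have hsimp : pre ++ [] ++ some v :: rest = pre ++ some v :: rest := by simp
        rw [hsimp]
        have hstep : pvRStep g ((List.range pre.length).map (pvDecide (pre ++ some v :: rest) g), prev, []) (some v)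
            = ((List.range pre.length).map (pvDecide (pre ++ some v :: rest) g) ++ [some v], some v, []) := rfl
        rw [hstep]
        have hget : (pre ++ some v :: rest).getD pre.length none = some v :=
          pv_getD_mid pre (some v) rest
        have hout : (List.range pre.length).map (pvDecide (pre ++ some v :: rest) g) ++ [some v]
            = (List.range (pre ++ [some v]).length).map (pvDecide (pre ++ some v :: rest) g) := by
          rw [show (pre ++ [some v]).length = pre.length + 1 by simp, List.range_succ, List.map_append]
          simp [pv_decide_some _ g _ v hget]
        rw [hout]
        have hseq : pre ++ some v :: rest = (pre ++ [some v]) ++ [] ++ rest := by simp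
        rw [hseq]
        exact ih (pre ++ [some v]) [] (some v) rfl (Or.inr ⟨pre, v, rfl, rfl⟩)
      · have hne : run.isEmpty = false := by simpa [List.isEmpty_iff] using hre
        set s := pre ++ run ++ some v :: rest with hsdef
        have hstep : pvRStep g ((List.range pre.length).map (pvDecide s g), prev, run) (some v)
            = ((List.range pre.length).map (pvDecide s g)
                ++ (if prev ≠ none ∧ (run.length : Int) ≤ g then List.replicate run.length prev
                    else run) ++ [some v], some v, []) := by
          simp [pvRStep, hne]
        rw [hstep]
        have hget : s.getD (pre.length + run.length) none = some v := by
          have := pv_getD_mid (pre ++ run) (some v) rest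
          simpa [hsdef] using this
        have hmid : (List.range' pre.length run.length).map (pvDecide s g)
            = (if prev ≠ none ∧ (run.length : Int) ≤ g then List.replicate run.length prev
               else run) := by
          rw [pv_map_const (pvDecide s g)
                (if prev ≠ none ∧ (run.length : Int) ≤ g then prev else none) run.length pre.length
                (fun t ht => pv_decide_in_run g pre run (some v :: rest) prev hrun hinv
                  (Or.inr ⟨v, rest, rfl, trivial⟩) t ht)]
          split_ifs with hc
          · rfl
          · exact hrun.symm
        have hout : (List.range pre.length).map (pvDecide s g)
              ++ (if prev ≠ none ∧ (run.length : Int) ≤ g then List.replicate run.length prev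
                  else run) ++ [some v]
            = (List.range (pre ++ run ++ [some v]).length).map (pvDecide s g) := by
          rw [show (pre ++ run ++ [some v]).length = (pre.length + run.length) + 1 by simp; omega,
            List.range_succ, List.map_append, pv_range_split, List.map_append, hmid]
          simp [pv_decide_some _ g _ v hget]
        rw [hout]
        have hseq : s = (pre ++ run ++ [some v]) ++ [] ++ rest := by simp [hsdef]
        rw [hseq]
        exact ih (pre ++ run ++ [some v]) [] (some v) rfl (Or.inr ⟨pre ++ run, v, rfl, rfl⟩)

-- pass 1 computes pvLast at every index
theorem pv_left_aux (seq : List (Option Int)) : ∀ k,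
    (List.range k).foldl
      (fun st i =>
        let last := if seq.getD i none ≠ none then some i else st.1
        (last, st.2 ++ [last]))
      (none, [])
    = (pvLastS seq k, (List.range k).map (pvLast seq)) := by
  intro k
  induction k with
  | zero => rfl
  | succ k ih =>
    rw [List.range_succ, List.foldl_append, ih]
    have hlast : (if seq.getD k none ≠ none then some k else pvLastS seq k) = pvLast seq k := by
      cases k <;> simp [pvLast, pvLastS]
    simp only [List.foldl_cons, List.foldl_nil, List.map_append, List.map_cons, List.map_nil]
    rw [hlast]
    exact Prod.ext rfl rfl

theorem pv_left_char (seq : List (Option Int)) :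
    pvLeftPass seq = (List.range seq.length).map (pvLast seq) := by
  unfold pvLeftPass
  rw [pv_left_aux]

-- pass 2 computes pvNext at every index (processed top-down, then reversed)
theorem pv_right_aux (seq : List (Option Int)) : ∀ (m : Nat) (acc : List (Option Nat)),
    m ≤ seq.length →
    ((List.range m).reverse).foldl
      (fun st i =>
        let nxt := if seq.getD i none ≠ none then some i else st.1
        (nxt, st.2 ++ [nxt]))
      (pvNext seq m, acc)
    = (pvNext seq 0, acc ++ ((List.range m).map (pvNext seq)).reverse) := by
  intro m
  induction m with
  | zero => intro acc _; simp
  | succ m ih =>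
    intro acc hm
    have hrev : (List.range (m+1)).reverse = m :: (List.range m).reverse := by
      rw [List.range_succ]; simp
    have hstep : (if seq.getD m none ≠ none then some m else pvNext seq (m+1))
        = pvNext seq m := by
      conv_rhs => rw [pvNext]
      rw [if_pos (Nat.lt_of_succ_le hm)]
    rw [hrev, List.foldl_cons]
    simp only [hstep]
    rw [ih (acc ++ [pvNext seq m]) (Nat.le_of_succ_le hm), List.range_succ]
    simp

theorem pv_right_char (seq : List (Option Int)) :
    pvRightPass seq = (List.range seq.length).map (pvNext seq) := by
  unfold pvRightPass
  rw [show (none : Option Nat) = pvNext seq seq.length from (pv_next_ge seq _ le_rfl).symm,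
    pv_right_aux seq seq.length [] le_rfl]
  simp

-- B = pointwise map
theorem pv_alt_char (seq : List (Option Int)) (g : Int) :
    fill_face_gaps_alt seq g = (List.range seq.length).map (pvDecide seq g) := by
  unfold fill_face_gaps_alt
  rw [pv_left_char, pv_right_char]
  have main : ∀ (l : List Nat) (acc : List (Option Int)), (∀ i ∈ l, i < seq.length) →
      l.foldl
        (fun out i =>
          let x := seq.getD i none
          if x = none then
            match ((List.range seq.length).map (pvLast seq)).getD i none with
            | some l' =>
              let e : Nat := (((List.range seq.length).map (pvNext seq)).getD i none).getD seq.length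
              if (e : Int) - (l' : Int) - 1 ≤ g then out ++ [seq.getD l' none]
              else out ++ [x]
            | none => out ++ [x]
          else out ++ [x]) acc
      = acc ++ l.map (pvDecide seq g) := by
    intro l
    induction l with
    | nil => intro acc _; simp
    | cons i l ih =>
      intro acc hmem
      have hi : i < seq.length := hmem i (by simp)
      rw [List.foldl_cons, List.map_cons]
      have hbody : ∀ out : List (Option Int),
          (let x := seq.getD i none
           if x = none then
             match ((List.range seq.length).map (pvLast seq)).getD i none with
             | some l' =>
               let e : Nat := (((List.range seq.length).map (pvNext seq)).getD i none).getD seq.length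
               if (e : Int) - (l' : Int) - 1 ≤ g then out ++ [seq.getD l' none]
               else out ++ [x]
             | none => out ++ [x]
           else out ++ [x]) = out ++ [pvDecide seq g i] := by
        intro out
        rw [PySem.List.getD_map_range _ _ _ _ hi, PySem.List.getD_map_range _ _ _ _ hi]
        show (if seq.getD i none = none then _ else _) = _
        unfold pvDecide
        by_cases hx : seq.getD i none = none
        · rw [if_pos hx, if_pos hx]
          cases hpl : pvLast seq i with
          | none => rw [hx]
          | some l' =>
            show (if _ then _ else _) = _
            rw [apply_ite (fun y : Option Int => out ++ [y]), hx]
        · rw [if_neg hx, if_neg hx]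
      rw [hbody, ih (acc ++ [pvDecide seq g i]) (fun j hj => hmem j (by simp [hj]))]
      simp
  rw [main (List.range seq.length) [] (by simp)]
  simp

-- ===== VERDICT (by name: the statement is the Claim_ definition above) =====
theorem fill_face_gaps_spec : Claim_equal_fill_face_gaps := by
  intro sequence max_gap _
  unfold Spec_fill_face_gaps fill_face_gaps
  have h1 := pv_main max_gap sequence [] [] none rfl (Or.inl ⟨rfl, rfl⟩)
  have h2 := pv_sim max_gap sequence [] [] none rfl (Or.inl ⟨rfl, rfl⟩)
  rw [pv_alt_char]
  simp only [List.length_nil, List.nil_append, List.range_eq_range'] at h1 h2 ⊢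
  exact h1.trans h2
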